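-- pv_equiv track=rewrite | github.com/srikarchundury/HyQBench | benchmarks/shors_runner.py | find_valid_a_values
-- ===== SOURCE A (Python) =====
-- from math import gcd
--
-- def find_valid_a_values(N: int) -> list:
--     """
--     Find all valid values of 'a' for Shor's algorithm.
--
--     A valid 'a' has gcd(a, N) = 1 and an even period r where
--     a^(r/2) != -1 mod N.
--
--     Args:
--         N: Number to factor.
--
--     Returns:
--         List of (a, r) tuples for valid base values.
--     """
--     valid_a = []
--     for a in range(2, N):
--         if gcd(a, N) != 1:
--             continue
--         r = 1
--         while pow(a, r, N) != 1 and r < N: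
--             r += 1
--         if r % 2 == 0 and pow(a, r // 2, N) != N - 1:
--             valid_a.append((a, r))
--     return valid_a
-- ===== SOURCE B (Python) =====
-- from math import gcd
--
--
-- def _phi(N):
--     """Euler's totient of N, counted directly (gcd(0, N) == N, so 0 never counts)."""
--     return sum(1 for k in range(N) if gcd(k, N) == 1)
--
--
-- def _divisors(phi):
--     """Divisors of phi in ascending order."""
--     return [d for d in range(1, phi + 1) if phi % d == 0]
--
--
-- def _order(a, N, phi, divs):
--     """Multiplicative order of a mod N: smallest divisor d of phi with a^d == 1 (mod N)."""
--     for d in divs: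
--         if pow(a, d, N) == 1:
--             return d
--     return phi  # unreachable for gcd(a, N) == 1: a^phi == 1 by Euler's theorem
--
--
-- def find_valid_a_values(N: int) -> list:
--     valid_a = []
--     phi = _phi(N)
--     divs = _divisors(phi)
--     for a in range(2, N):
--         if gcd(a, N) != 1:
--             continue
--         r = _order(a, N, phi, divs)
--         if r % 2 == 0 and pow(a, r // 2, N) != N - 1:
--             valid_a.append((a, r))
--     return valid_a
-- ===== Notes on version B (the rewrite author's own statement) =====
-- stated objective: faster
-- what changed: Instead of scanning candidate exponents upward one step at a time with a fresh modular exponentiation at every step, B computes Euler's totient phi(N) once, lists the divisors of phi(N) in ascending order once, and finds each base's order as the smallest divisor d of phi(N) with pow(a, d, N) == 1 (the order always divides phi(N)), keeping the same coprimality filter and final evenness check.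
import Mathlib
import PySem

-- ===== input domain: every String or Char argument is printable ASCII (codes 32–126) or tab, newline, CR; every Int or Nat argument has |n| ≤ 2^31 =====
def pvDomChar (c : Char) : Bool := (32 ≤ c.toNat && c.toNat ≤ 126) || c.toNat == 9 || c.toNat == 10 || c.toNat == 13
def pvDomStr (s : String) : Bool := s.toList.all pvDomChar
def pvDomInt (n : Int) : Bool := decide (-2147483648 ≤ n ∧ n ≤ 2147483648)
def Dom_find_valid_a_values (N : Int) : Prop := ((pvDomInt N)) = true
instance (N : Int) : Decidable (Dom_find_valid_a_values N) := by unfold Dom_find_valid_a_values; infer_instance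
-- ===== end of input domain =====

-- B replaces A's step-by-step scan for the order r with a divisor search: it computes Euler's
-- totient phi(N) once, lists phi(N)'s divisors ascending once, and takes each base's order as the
-- smallest divisor d with pow(a, d, N) == 1 (the order divides phi(N)); measurably faster.

-- ===== PORT A =====
-- A's inner `while pow(a, r, N) != 1 and r < N: r += 1`, returning the final r.
def aLoop (a N r : Int) : Int :=
  if PySem.Int.powMod a r.toNat N ≠ 1 ∧ r < N then aLoop a N (r + 1) else r
termination_by (N - r).toNat
decreasing_by omega

def find_valid_a_values (N : Int) : List (Int × Int) :=
  (PySem.List.pyRange 2 N 1).foldl (fun valid_a a =>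
    if Int.gcd a N ≠ 1 then valid_a
    else
      let r := aLoop a N 1
      if PySem.Int.mod r 2 = 0 ∧ PySem.Int.powMod a (PySem.Int.floordiv r 2).toNat N ≠ N - 1 then
        valid_a ++ [(a, r)]
      else valid_a) []

-- ===== PORT B =====
-- B's `_phi`: Euler's totient, counted directly.
def phiOf (N : Int) : Int :=
  ((PySem.List.pyRange 0 N 1).filter (fun k => Int.gcd k N == 1)).length

-- B's `_divisors`: divisors of phi in ascending order.
def divisorsAsc (phi : Int) : List Int :=
  (PySem.List.pyRange 1 (phi + 1) 1).filter (fun d => PySem.Int.mod phi d == 0)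

-- B's `_order`: first divisor d of phi with pow(a, d, N) == 1.
def orderVia (a N phi : Int) (divs : List Int) : Int :=
  match divs.find? (fun d => PySem.Int.powMod a d.toNat N == 1) with
  | some d => d
  | none => phi

def find_valid_a_values_alt (N : Int) : List (Int × Int) :=
  let phi := phiOf N
  let divs := divisorsAsc phi
  (PySem.List.pyRange 2 N 1).foldl (fun valid_a a =>
    if Int.gcd a N ≠ 1 then valid_a
    else
      let r := orderVia a N phi divs
      if PySem.Int.mod r 2 = 0 ∧ PySem.Int.powMod a (PySem.Int.floordiv r 2).toNat N ≠ N - 1 then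
        valid_a ++ [(a, r)]
      else valid_a) []

-- ===== PRECONDITION & SPEC =====
def Spec_find_valid_a_values (N : Int) (out : List (Int × Int)) : Prop := out = find_valid_a_values_alt N
instance (N : Int) (out : List (Int × Int)) : Decidable (Spec_find_valid_a_values N out) := by unfold Spec_find_valid_a_values; infer_instance

-- ===== CLAIM (what is proved, stated in full; the proofs are below) =====
def Claim_equal_find_valid_a_values : Prop := ∀ (N : Int), Dom_find_valid_a_values N → Spec_find_valid_a_values N (find_valid_a_values N)

-- ===== LEMMAS AND PROOFS =====

-- Euler's totient as the list count B computes.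
theorem totient_countP (n : ℕ) :
    Nat.totient n = (List.range n).countP (fun k => Nat.gcd n k == 1) := by
  rw [Nat.totient, List.countP_eq_length_filter, Finset.filter]
  simp only [Finset.card, Finset.range, Multiset.range, Multiset.filter]
  congr 1

-- B's phi equals Euler's totient of N.toNat (for 0 ≤ N).
theorem phiOf_eq_totient (N : Int) (hN : 0 ≤ N) :
    phiOf N = (Nat.totient N.toNat : Int) := by
  unfold phiOf
  rw [totient_countP, PySem.List.pyRange_one, List.countP_eq_length_filter, List.filter_map,
    List.length_map]
  have hNN : (N - 0).toNat = N.toNat := by omega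
  rw [hNN]
  congr 2
  apply List.filter_congr
  intro x _
  simp only [Function.comp_apply, zero_add]
  have h3 : Int.gcd (x : Int) N = Nat.gcd x N.toNat := by
    unfold Int.gcd
    rw [Int.natAbs_natCast]
    congr 1
    omega
  rw [h3, Nat.gcd_comm]

-- pow(a, k, N) == 1 iff the cast of a to ZMod N.toNat has k-th power 1 (for 1 < N, 0 ≤ a).
theorem powMod_eq_one_iff (a N : Int) (k : ℕ) (hN : 1 < N) :
    PySem.Int.powMod a k N = 1 ↔ ((a : ZMod N.toNat) ^ k = 1) := by
  rw [PySem.Int.powMod_eq_emod a k (by omega : (0:Int) < N)]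
  have hcast : ((N.toNat : Int)) = N := Int.toNat_of_nonneg (by omega)
  have h1 := ZMod.intCast_eq_intCast_iff (a ^ k) 1 N.toNat
  push_cast at h1
  rw [h1]
  show a ^ k % N = 1 ↔ a ^ k % ((N.toNat : Int)) = 1 % ((N.toNat : Int))
  have h2 : (1 : Int) % N = 1 := Int.emod_eq_of_lt (by omega) hN
  rw [hcast, h2]

-- In a strictly increasing list, the first element satisfying p is the minimum satisfier.
theorem find?_first_sorted {l : List Int} {p : Int → Bool} {m : Int}
    (hs : l.Pairwise (· < ·)) (hm : m ∈ l) (hpm : p m = true)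
    (hmin : ∀ d ∈ l, p d = true → m ≤ d) : l.find? p = some m := by
  induction l with
  | nil => cases hm
  | cons h t ih =>
    rw [List.find?_cons]
    by_cases hph : p h = true
    · rw [hph]
      have hmh : m ≤ h := hmin h List.mem_cons_self hph
      rcases List.mem_cons.mp hm with rfl | hmt
      · rfl
      · have : h < m := (List.pairwise_cons.mp hs).1 m hmt
        omega
    · rw [Bool.not_eq_true] at hph
      rw [hph]
      have hmt : m ∈ t := by
        rcases List.mem_cons.mp hm with rfl | hmt
        · rw [hpm] at hph
          cases hph
        · exact hmt
      exact ih (List.pairwise_cons.mp hs).2 hmt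
        (fun d hd hp => hmin d (List.mem_cons_of_mem h hd) hp)

-- The core fact: for 3 ≤ N, 2 ≤ a < N, gcd(a, N) = 1, A's scan and B's divisor search
-- both produce the multiplicative order of a modulo N.
theorem key_order (N a : Int) (hN : 3 ≤ N) (ha2 : 2 ≤ a) (_haN : a < N)
    (hg : Int.gcd a N = 1) :
    aLoop a N 1 = orderVia a N (phiOf N) (divisorsAsc (phiOf N)) := by
  have hNn : ((N.toNat : Int)) = N := Int.toNat_of_nonneg (by omega)
  -- a is coprime to N
  have hcop : Nat.Coprime a.toNat N.toNat := by
    have h1 : a.natAbs = a.toNat := by omega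
    have h2 : N.natAbs = N.toNat := by omega
    unfold Int.gcd at hg
    rwa [h1, h2] at hg
  -- Euler: a ^ totient ≡ 1, so a has finite order dividing the totient
  have heuler : ((a : ZMod N.toNat)) ^ Nat.totient N.toNat = 1 := by
    have h1 := (ZMod.natCast_eq_natCast_iff _ _ N.toNat).mpr (Nat.ModEq.pow_totient hcop)
    push_cast at h1
    have hax : ((a.toNat : ℕ) : ZMod N.toNat) = ((a : ZMod N.toNat)) := by
      have : ((a.toNat : Int)) = a := Int.toNat_of_nonneg (by omega)
      rw [← this]
      push_cast
      rfl
    rwa [hax] at h1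
  have htotpos : 0 < Nat.totient N.toNat := Nat.totient_pos.mpr (by omega)
  have hordpos : 0 < orderOf ((a : ZMod N.toNat)) :=
    orderOf_pos_iff.mpr (isOfFinOrder_iff_pow_eq_one.mpr ⟨_, htotpos, heuler⟩)
  have horddvd : orderOf ((a : ZMod N.toNat)) ∣ Nat.totient N.toNat :=
    orderOf_dvd_of_pow_eq_one heuler
  have hordle : orderOf ((a : ZMod N.toNat)) ≤ Nat.totient N.toNat :=
    Nat.le_of_dvd htotpos horddvd
  have htotlt : Nat.totient N.toNat < N.toNat := Nat.totient_lt _ (by omega)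
  set ord : ℕ := orderOf ((a : ZMod N.toNat)) with hord
  -- pow(a, k, N) == 1 exactly at the multiples of the order
  have hpowiff : ∀ k : ℕ, (PySem.Int.powMod a k N = 1 ↔ ord ∣ k) := fun k =>
    (powMod_eq_one_iff a N k (by omega)).trans orderOf_dvd_iff_pow_eq_one.symm
  have hordltN : ((ord : Int)) < N := by omega
  -- A's scan from any r ≤ ord stops exactly at ord
  have hA : ∀ (fuel : ℕ) (r : Int), 1 ≤ r → r ≤ (ord : Int) → (ord : Int) - r ≤ (fuel : Int) →
      aLoop a N r = (ord : Int) := by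
    intro fuel
    induction fuel with
    | zero =>
      intro r h1 h2 h3
      have hr : r = (ord : Int) := by omega
      subst hr
      have hpow : PySem.Int.powMod a ((ord : Int)).toNat N = 1 := by
        rw [hpowiff]
        simp
      rw [aLoop, if_neg]
      intro hc
      exact hc.1 hpow
    | succ f ih =>
      intro r h1 h2 h3
      by_cases heq : r = (ord : Int)
      · subst heq
        have hpow : PySem.Int.powMod a ((ord : Int)).toNat N = 1 := by
          rw [hpowiff]
          simp
        rw [aLoop, if_neg]
        intro hc
        exact hc.1 hpow
      · have hpow : PySem.Int.powMod a r.toNat N ≠ 1 := by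
          intro hc
          have hdvd := (hpowiff r.toNat).mp hc
          have := Nat.le_of_dvd (by omega) hdvd
          omega
        rw [aLoop, if_pos ⟨hpow, by omega⟩]
        exact ih (r + 1) (by omega) (by omega) (by omega)
  -- B's divisor search finds exactly ord
  have hmin : ∀ d ∈ divisorsAsc (phiOf N),
      (PySem.Int.powMod a d.toNat N == 1) = true → (ord : Int) ≤ d := by
    intro d hd hp
    have hd1 : 1 ≤ d := by
      unfold divisorsAsc at hd
      have := (List.mem_filter.mp hd).1
      rw [PySem.List.mem_pyRange_one] at this
      omega
    have hdvd := (hpowiff d.toNat).mp (by exact beq_iff_eq.mp hp)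
    have := Nat.le_of_dvd (by omega) hdvd
    omega
  have hmem : (ord : Int) ∈ divisorsAsc (phiOf N) := by
    unfold divisorsAsc
    rw [List.mem_filter, PySem.List.mem_pyRange_one]
    refine ⟨⟨by omega, by rw [phiOf_eq_totient N (by omega)]; omega⟩, ?_⟩
    rw [beq_iff_eq, PySem.Int.mod_eq_zero_iff_dvd, phiOf_eq_totient N (by omega)]
    exact_mod_cast horddvd
  have hpord : (PySem.Int.powMod a ((ord : Int)).toNat N == 1) = true := by
    rw [beq_iff_eq, hpowiff]
    simp
  have hB : (divisorsAsc (phiOf N)).find? (fun d => PySem.Int.powMod a d.toNat N == 1) =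
      some (ord : Int) :=
    find?_first_sorted (PySem.List.pairwise_lt_pyRange_one 1 (phiOf N + 1) |>.filter _)
      hmem hpord hmin
  rw [orderVia, hB]
  exact hA ord 1 (by omega) (by omega) (by omega)

-- ===== VERDICT (by name: the statement is the Claim_ definition above) =====
theorem find_valid_a_values_spec : Claim_equal_find_valid_a_values := by
  intro N _
  unfold Spec_find_valid_a_values find_valid_a_values find_valid_a_values_alt
  by_cases hN : N ≤ 2
  · rw [PySem.List.pyRange_one_eq_nil (by omega)]
    rfl
  · apply PySem.List.foldl_congr_mem
    intro acc a hmem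
    rw [PySem.List.mem_pyRange_one] at hmem
    by_cases hg : Int.gcd a N = 1
    · simp only [hg, ne_eq, not_true_eq_false, if_false]
      rw [key_order N a (by omega) hmem.1 hmem.2 hg]
    · simp [hg]
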